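-- pv_equiv track=rewrite | github.com/damien-neveu/algo-study | arrays/locate_smallest_sortable_window.py | index_of_last_elem_less_than_last_known_max
-- ===== SOURCE A (Python) =====
-- def index_of_last_elem_less_than_last_known_max(arr):
--     res = None
--     last_known_max = arr[0]
--     for i in list(range(len(arr))):
--         if arr[i] < last_known_max:
--             res = i
--         else:
--             last_known_max = arr[i]
--     return res
-- ===== SOURCE B (Python) =====
-- def index_of_last_elem_less_than_last_known_max(arr):
--     pmax = []
--     m = arr[0]
--     for x in arr:
--         m = x if x > m else m
--         pmax.append(m)
--     for i, (a, p) in reversed(list(enumerate(zip(arr, pmax)))):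
--         if a < p:
--             return i
--     return None
-- ===== Notes on version B (the rewrite author's own statement) =====
-- stated objective: alternative
-- what changed: Replaces the single forward scan with mutable running-max state by a prefix-maximum table built in one pass plus a reverse early-return search for the first (i.e. last) index whose element is below its prefix maximum.
import Mathlib
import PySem

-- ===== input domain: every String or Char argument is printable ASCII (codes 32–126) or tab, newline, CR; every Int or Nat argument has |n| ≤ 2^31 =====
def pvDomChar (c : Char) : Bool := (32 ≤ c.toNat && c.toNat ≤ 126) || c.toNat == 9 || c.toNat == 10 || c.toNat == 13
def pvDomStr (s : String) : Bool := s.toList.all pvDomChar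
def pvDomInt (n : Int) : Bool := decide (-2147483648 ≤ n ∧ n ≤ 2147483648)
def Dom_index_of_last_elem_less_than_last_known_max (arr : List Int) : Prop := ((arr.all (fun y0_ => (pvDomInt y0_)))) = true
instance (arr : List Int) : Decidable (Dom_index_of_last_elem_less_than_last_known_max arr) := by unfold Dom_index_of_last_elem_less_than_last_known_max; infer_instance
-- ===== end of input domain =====

-- B replaces A's single forward scan carrying a mutable running max by a prefix-maximum
-- table built in one pass plus a reverse early-return search (alternative decomposition,
-- same cost). Both raise IndexError on the empty list, which Pre_ excludes.


-- ===== PORT A =====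
-- the for-loop of A: state (res, last_known_max), i the current index
def pvALoop (res : Option Int) (lkm : Int) (i : Int) : List Int → Option Int
  | [] => res
  | x :: xs => if x < lkm then pvALoop (some i) lkm (i + 1) xs
               else pvALoop res x (i + 1) xs

def index_of_last_elem_less_than_last_known_max (arr : List Int) : Option Int :=
  match arr with
  | [] => none                     -- Python raises IndexError reading the first element; excluded by Pre_
  | h :: _ => pvALoop none h 0 arr

-- ===== PORT B =====
-- first pass of B: the prefix-maximum table (m starts at the first element, folded over all of arr)
def pvPmaxFrom (m : Int) : List Int → List Int
  | [] => []
  | x :: xs => (if x > m then x else m) :: pvPmaxFrom (if x > m then x else m) xs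

-- index pairs, Python ints
def pvEnumFrom (i : Int) : List (Int × Int) → List (Int × Int × Int)
  | [] => []
  | p :: ps => (i, p) :: pvEnumFrom (i + 1) ps

-- second pass of B: first hit of the reversed enumerated zip
def pvFindRev : List (Int × Int × Int) → Option Int
  | [] => none
  | (i, a, p) :: rest => if a < p then some i else pvFindRev rest

def index_of_last_elem_less_than_last_known_max_alt (arr : List Int) : Option Int :=
  match arr with
  | [] => none                     -- Python raises IndexError reading the first element; excluded by Pre_
  | h :: _ => pvFindRev ((pvEnumFrom 0 (arr.zip (pvPmaxFrom h arr))).reverse)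

-- ===== PRECONDITION & SPEC =====
-- Pre_ excludes only the empty list, on which both Pythons raise IndexError reading the first element.
def Pre_index_of_last_elem_less_than_last_known_max (arr : List Int) : Prop := arr ≠ []
instance (arr : List Int) : Decidable (Pre_index_of_last_elem_less_than_last_known_max arr) := by unfold Pre_index_of_last_elem_less_than_last_known_max; infer_instance
def pvWitness_index_of_last_elem_less_than_last_known_max : List Int := [3, 1, 2]

def Spec_index_of_last_elem_less_than_last_known_max (arr : List Int) (out : Option Int) : Prop := out = index_of_last_elem_less_than_last_known_max_alt arr
instance (arr : List Int) (out : Option Int) : Decidable (Spec_index_of_last_elem_less_than_last_known_max arr out) := by unfold Spec_index_of_last_elem_less_than_last_known_max; infer_instance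

-- ===== CLAIM (what is proved, stated in full; the proofs are below) =====
def Claim_equal_index_of_last_elem_less_than_last_known_max : Prop := ∀ (arr : List Int), Dom_index_of_last_elem_less_than_last_known_max arr → Pre_index_of_last_elem_less_than_last_known_max arr → Spec_index_of_last_elem_less_than_last_known_max arr (index_of_last_elem_less_than_last_known_max arr)

-- ===== LEMMAS AND PROOFS =====
lemma pvFindRev_append (l : List (Int × Int × Int)) (e : Int × Int × Int) :
    pvFindRev (l ++ [e]) =
      match pvFindRev l with
      | some j => some j
      | none => pvFindRev [e] := by
  induction l with
  | nil => simp [pvFindRev]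
  | cons hd tl ih =>
    obtain ⟨i, a, p⟩ := hd
    by_cases h : a < p <;> simp [pvFindRev, h, ih]

lemma pvALoop_eq (xs : List Int) : ∀ (res : Option Int) (lkm i : Int),
    pvALoop res lkm i xs =
      match pvFindRev ((pvEnumFrom i (xs.zip (pvPmaxFrom lkm xs))).reverse) with
      | some j => some j
      | none => res := by
  induction xs with
  | nil => intro res lkm i; simp [pvALoop, pvPmaxFrom, pvEnumFrom, pvFindRev]
  | cons x xs ih =>
    intro res lkm i
    have hm : pvPmaxFrom lkm (x :: xs) =
        (if x > lkm then x else lkm) :: pvPmaxFrom (if x > lkm then x else lkm) xs := rfl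
    by_cases hx : x < lkm
    · have hgt : ¬ x > lkm := by omega
      simp only [pvALoop, hx, if_true, hm, hgt, if_false, List.zip_cons_cons,
        pvEnumFrom, List.reverse_cons, pvFindRev_append, ih]
      cases pvFindRev ((pvEnumFrom (i + 1) (xs.zip (pvPmaxFrom lkm xs))).reverse) with
      | none => simp [pvFindRev, hx]
      | some j => simp
    · -- x ≥ lkm, so the new running max is x (equal to the if-expression)
      have hmx : (if x > lkm then x else lkm) = x := by split <;> omega
      simp only [pvALoop, hx, if_false, hm, hmx, List.zip_cons_cons,
        pvEnumFrom, List.reverse_cons, pvFindRev_append, ih]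
      cases pvFindRev ((pvEnumFrom (i + 1) (xs.zip (pvPmaxFrom x xs))).reverse) with
      | none => simp [pvFindRev]
      | some j => simp

-- ===== VERDICT (by name: the statement is the Claim_ definition above) =====
theorem index_of_last_elem_less_than_last_known_max_spec : Claim_equal_index_of_last_elem_less_than_last_known_max := by
  intro arr _ hpre
  unfold Spec_index_of_last_elem_less_than_last_known_max
  match arr with
  | [] => exact absurd rfl hpre
  | h :: t =>
    simp only [index_of_last_elem_less_than_last_known_max,
      index_of_last_elem_less_than_last_known_max_alt, pvALoop_eq]
    cases pvFindRev ((pvEnumFrom 0 ((h :: t).zip (pvPmaxFrom h (h :: t)))).reverse) <;> simp
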